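-- pv_equiv track=rewrite | github.com/the-rusty-shackleford/advent_of_code | 2024/01/solution.py | find_similarity_score
-- ===== SOURCE A (Python) =====
-- from collections import defaultdict
--
-- def find_similarity_score(column1, column2):
--     d1 = defaultdict(int)
--     d2 = defaultdict(int)
--
--     for num in column1:
--         d1[num] += 1
--
--     for num in column2:
--         d2[num] += 1
--
--     total = 0
--     for k, v in d1.items():
--         total += k * v * d2[k]
--
--     return total
-- ===== SOURCE B (Python) =====
-- def find_similarity_score(column1, column2):
--     a = sorted(column1)
--     b = sorted(column2)
--     n, m = len(a), len(b)
--     i, j, total = 0, 0, 0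
--     while i < n and j < m:
--         if a[i] < b[j]:
--             i += 1
--         elif b[j] < a[i]:
--             j += 1
--         else:
--             v = a[i]
--             i0, j0 = i, j
--             while i < n and a[i] == v:
--                 i += 1
--             while j < m and b[j] == v:
--                 j += 1
--             total += v * (i - i0) * (j - j0)
--     return total
-- ===== Notes on version B (the rewrite author's own statement) =====
-- stated objective: alternative
-- what changed: B uses no frequency table at all: it sorts both columns and computes the score with a two-pointer merge over runs of equal values, accumulating v * run1 * run2 whenever the pointers meet equal values, instead of A's two defaultdict counting passes plus a loop over grouped keys.
import Mathlib
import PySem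

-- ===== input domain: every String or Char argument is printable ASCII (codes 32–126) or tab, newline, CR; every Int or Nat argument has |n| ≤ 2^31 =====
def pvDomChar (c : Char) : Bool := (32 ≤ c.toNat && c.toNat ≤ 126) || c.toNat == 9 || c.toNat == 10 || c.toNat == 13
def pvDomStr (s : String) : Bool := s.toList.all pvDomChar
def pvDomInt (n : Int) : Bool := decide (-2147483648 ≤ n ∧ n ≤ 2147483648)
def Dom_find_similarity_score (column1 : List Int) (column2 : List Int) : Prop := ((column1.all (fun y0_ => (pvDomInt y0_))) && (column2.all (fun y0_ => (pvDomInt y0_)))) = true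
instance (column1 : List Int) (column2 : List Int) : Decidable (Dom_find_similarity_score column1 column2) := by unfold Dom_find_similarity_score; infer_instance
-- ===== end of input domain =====

-- B drops the frequency tables entirely: it sorts both columns and merges runs of equal
-- values with two pointers (alternative algorithm, similar cost).

-- ===== PORT A =====
-- d1, d2 are defaultdict(int) counting loops; the final loop walks d1.items in insertion order.
def find_similarity_score (column1 : List Int) (column2 : List Int) : Int :=
  let d1 : PySem.Dict Int Int := column1.foldl (fun d num => d.modify num 0 (· + 1)) PySem.Dict.empty
  let d2 : PySem.Dict Int Int := column2.foldl (fun d num => d.modify num 0 (· + 1)) PySem.Dict.empty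
  d1.items.foldl (fun total kv => total + kv.1 * kv.2 * d2.getD kv.1 0) 0

-- ===== PORT B =====
-- inner 'while a[i] == v' loops of Source B: consume the run of v's, returning its length and the rest
def pvRun (v : Int) : List Int → Nat × List Int
  | [] => (0, [])
  | x :: t => if x = v then ((pvRun v t).1 + 1, (pvRun v t).2) else (0, x :: t)

theorem pvRun_snd_length_le (v : Int) (l : List Int) : (pvRun v l).2.length ≤ l.length := by
  induction l with
  | nil => simp [pvRun]
  | cons x t ih =>
    by_cases h : x = v <;> simp [pvRun, h]
    omega

-- outer while-loop of Source B on the two sorted lists (two pointers = two list suffixes)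
def pvMerge : List Int → List Int → Int
  | [], _ => 0
  | _ :: _, [] => 0
  | x :: a, y :: b =>
    if x < y then pvMerge a (y :: b)
    else if y < x then pvMerge (x :: a) b
    else
      x * ((pvRun x a).1 + 1) * ((pvRun x b).1 + 1) + pvMerge (pvRun x a).2 (pvRun x b).2
termination_by a b => a.length + b.length
decreasing_by
  · simp
  · simp
  · have h1 := pvRun_snd_length_le x a
    have h2 := pvRun_snd_length_le x b
    simp; omega

def find_similarity_score_alt (column1 : List Int) (column2 : List Int) : Int :=
  pvMerge (PySem.List.sorted column1 (fun x => x) false) (PySem.List.sorted column2 (fun x => x) false)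

-- ===== PRECONDITION & SPEC =====
def Spec_find_similarity_score (column1 : List Int) (column2 : List Int) (out : Int) : Prop := out = find_similarity_score_alt column1 column2
instance (column1 : List Int) (column2 : List Int) (out : Int) : Decidable (Spec_find_similarity_score column1 column2 out) := by unfold Spec_find_similarity_score; infer_instance

-- ===== CLAIM (what is proved, stated in full; the proofs are below) =====
def Claim_equal_find_similarity_score : Prop := ∀ (column1 : List Int) (column2 : List Int), Dom_find_similarity_score column1 column2 → Spec_find_similarity_score column1 column2 (find_similarity_score column1 column2)

-- ===== LEMMAS AND PROOFS =====

-- the common value both programs compute: sum over xs of x * (how often x occurs in ys)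
def pvS (xs ys : List Int) : Int := (xs.map (fun x => x * (ys.count x : Int))).sum

theorem pvRun_decomp (v : Int) (l : List Int) :
    l = List.replicate (pvRun v l).1 v ++ (pvRun v l).2 := by
  induction l with
  | nil => simp [pvRun]
  | cons x t ih =>
    by_cases h : x = v
    · subst h; simp [pvRun, List.replicate_succ]; exact ih
    · simp [pvRun, h]

theorem pvRun_snd_gt (v : Int) (l : List Int) (hs : l.Pairwise (· ≤ ·))
    (hlb : ∀ z ∈ l, v ≤ z) : ∀ z ∈ (pvRun v l).2, v < z := by
  induction l with
  | nil => simp [pvRun]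
  | cons x t ih =>
    rcases List.pairwise_cons.mp hs with ⟨hx, ht⟩
    by_cases h : x = v
    · subst h
      simp only [pvRun]
      exact ih ht (fun z hz => hx z hz)
    · intro z hz
      simp only [pvRun, if_neg h] at hz
      have hxv : v < x := lt_of_le_of_ne (hlb x (by simp)) (fun he => h he.symm)
      rcases List.mem_cons.mp hz with rfl | hzt
      · exact hxv
      · exact lt_of_lt_of_le hxv (hx z hzt)

theorem pvRun_snd_pairwise (v : Int) (l : List Int) (hs : l.Pairwise (· ≤ ·)) :
    (pvRun v l).2.Pairwise (· ≤ ·) := by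
  have hsuf : (pvRun v l).2.Sublist l := by
    conv_rhs => rw [pvRun_decomp v l]
    exact List.sublist_append_right _ _
  exact hs.sublist hsuf

theorem pvRun_fst_count (v : Int) (l : List Int) (hs : l.Pairwise (· ≤ ·))
    (hlb : ∀ z ∈ l, v ≤ z) : l.count v = (pvRun v l).1 := by
  conv_lhs => rw [pvRun_decomp v l]
  have h0 : (pvRun v l).2.count v = 0 := by
    rw [List.count_eq_zero]
    intro hm
    exact absurd rfl (ne_of_gt (pvRun_snd_gt v l hs hlb v hm))
  simp [List.count_append, h0]

theorem pvS_count_congr (xs ys ys' : List Int)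
    (h : ∀ z ∈ xs, ys.count z = ys'.count z) : pvS xs ys = pvS xs ys' := by
  unfold pvS
  congr 1
  exact List.map_congr_left (fun z hz => by rw [h z hz])

theorem pvMerge_eq_pvS (a b : List Int) (ha : a.Pairwise (· ≤ ·)) (hb : b.Pairwise (· ≤ ·)) :
    pvMerge a b = pvS a b := by
  induction a, b using pvMerge.induct with
  | case1 b => simp [pvMerge, pvS]
  | case2 x a =>
    simp only [pvMerge, pvS]
    simp
  | case3 x a y b hxy ih =>
    rcases List.pairwise_cons.mp ha with ⟨hxa, ha'⟩
    rcases List.pairwise_cons.mp hb with ⟨hyb, hb'⟩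
    rw [pvMerge, if_pos hxy, ih ha' hb]
    have hc : (y :: b).count x = 0 := by
      rw [List.count_eq_zero]
      intro hm
      rcases List.mem_cons.mp hm with rfl | hmb
      · exact absurd hxy (lt_irrefl x)
      · exact absurd (hyb x hmb) (not_le.mpr hxy)
    simp [pvS, hc]
  | case4 x a y b hxy hyx ih =>
    rcases List.pairwise_cons.mp ha with ⟨hxa, ha'⟩
    rcases List.pairwise_cons.mp hb with ⟨hyb, hb'⟩
    rw [pvMerge, if_neg hxy, if_pos hyx, ih ha hb']
    apply pvS_count_congr
    intro z hz
    have hyz : y ≠ z := by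
      rcases List.mem_cons.mp hz with rfl | hza
      · exact ne_of_lt hyx
      · exact ne_of_lt (lt_of_lt_of_le hyx (hxa z hza))
    simp [hyz]
  | case5 x a y b hxy hyx ih =>
    have hxey : x = y := le_antisymm (not_lt.mp hyx) (not_lt.mp hxy)
    subst hxey
    rcases List.pairwise_cons.mp ha with ⟨hxa, ha'⟩
    rcases List.pairwise_cons.mp hb with ⟨hxb, hb'⟩
    rw [pvMerge, if_neg hxy, if_neg hyx,
        ih (pvRun_snd_pairwise x a ha') (pvRun_snd_pairwise x b hb')]
    -- count of x in x :: b is the full run length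
    have hcb : ((x :: b).count x : Int) = ((pvRun x b).1 + 1 : Int) := by
      have := pvRun_fst_count x b hb' hxb
      rw [List.count_cons_self, this]
      push_cast; ring
    -- split x :: a into its x-run and the strictly larger rest
    have hsplit : x :: a = List.replicate ((pvRun x a).1 + 1) x ++ (pvRun x a).2 := by
      rw [List.replicate_succ, List.cons_append]
      congr 1
      exact pvRun_decomp x a
    conv_rhs => rw [pvS, hsplit]
    rw [List.map_append, List.sum_append]
    have hrep : ((List.replicate ((pvRun x a).1 + 1) x).map
        (fun z => z * ((x :: b).count z : Int))).sum
        = x * ((pvRun x a).1 + 1) * ((pvRun x b).1 + 1) := by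
      rw [List.map_replicate, List.sum_replicate, hcb]
      simp
      ring
    have hrest : (((pvRun x a).2).map (fun z => z * ((x :: b).count z : Int))).sum
        = pvS (pvRun x a).2 (pvRun x b).2 := by
      apply congrArg List.sum
      apply List.map_congr_left
      intro z hz
      have hzgt : x < z := pvRun_snd_gt x a ha' hxa z hz
      have hcz : (x :: b).count z = (pvRun x b).2.count z := by
        conv_lhs => rw [show x :: b = List.replicate ((pvRun x b).1 + 1) x ++ (pvRun x b).2 by
          rw [List.replicate_succ, List.cons_append]; congr 1; exact pvRun_decomp x b]
        rw [List.count_append, List.count_replicate]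
        simp [Ne.symm (ne_of_gt hzgt)]
      rw [hcz]
    rw [hrep, hrest]

-- A equals pvS on the raw columns (grouped-key sum = plain sum over column1)
theorem pv_sum_map_ite (l : List Int) (hnd : l.Nodup) (x c : Int) :
    (l.map (fun k => if k = x then c else 0)).sum = if x ∈ l then c else 0 := by
  induction l with
  | nil => simp
  | cons a t ih =>
    rcases List.nodup_cons.mp hnd with ⟨ha, hnt⟩
    by_cases hax : a = x
    · subst hax
      simp [List.sum_cons, ih hnt, ha]
    · simp [List.sum_cons, hax, ih hnt, Ne.symm hax]

theorem pv_grouped_sum (f : Int → Int) (l : List Int) (hnd : l.Nodup) (xs : List Int) :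
    (l.map (fun k => (xs.count k : Int) * f k)).sum
      = ((xs.filter (fun a => decide (a ∈ l))).map f).sum := by
  induction xs with
  | nil => simp
  | cons x t ih =>
    have hcount : ∀ k : Int, ((x :: t).count k : Int) * f k
        = (t.count k : Int) * f k + (if k = x then f x else 0) := by
      intro k
      by_cases hk : k = x
      · subst hk; simp [List.count_cons_self]; ring
      · simp [List.count_cons, hk]; exact Or.inl fun h => hk h.symm
    rw [List.map_congr_left (fun k _ => hcount k), PySem.List.sum_map_add_int, ih,
      pv_sum_map_ite l hnd x (f x)]
    by_cases hx : x ∈ l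
    · simp [hx, add_comm]
    · simp [hx]

theorem pv_A_eq_pvS (column1 column2 : List Int) :
    find_similarity_score column1 column2 = pvS column1 column2 := by
  unfold find_similarity_score
  have hd1 : column1.foldl (fun (d : PySem.Dict Int Int) num => d.modify num 0 (· + 1)) PySem.Dict.empty
      = PySem.Dict.counter column1 := (PySem.Dict.counter_eq_foldl column1).symm
  have hd2 : column2.foldl (fun (d : PySem.Dict Int Int) num => d.modify num 0 (· + 1)) PySem.Dict.empty
      = PySem.Dict.counter column2 := (PySem.Dict.counter_eq_foldl column2).symm
  rw [hd1, hd2, PySem.List.foldl_add, PySem.Dict.items_counter]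
  simp only [List.map_map, Function.comp_def, PySem.Dict.getD_counter, zero_add]
  have hfun : (fun k : Int => k * (column1.count k : Int) * (column2.count k : Int))
      = fun k : Int => (column1.count k : Int) * (k * (column2.count k : Int)) := by
    funext k; ring
  rw [hfun, pv_grouped_sum _ _ (PySem.Set.nodup_ofList column1)]
  have hfilter : column1.filter (fun a => decide (a ∈ PySem.Set.ofList column1)) = column1 := by
    apply List.filter_eq_self.mpr
    intro a ha
    simpa [PySem.Set.mem_ofList] using ha
  rw [hfilter]
  rfl

-- pvS is invariant under sorting either argument
theorem pvS_sorted (column1 column2 : List Int) :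
    pvS column1 column2
      = pvS (PySem.List.sorted column1 (fun x => x) false) (PySem.List.sorted column2 (fun x => x) false) := by
  have hp1 : (PySem.List.sorted column1 (fun x => x) false).Perm column1 :=
    PySem.List.sorted_perm column1 (fun x => x) false
  have hp2 : (PySem.List.sorted column2 (fun x => x) false).Perm column2 :=
    PySem.List.sorted_perm column2 (fun x => x) false
  calc pvS column1 column2
      = pvS column1 (PySem.List.sorted column2 (fun x => x) false) :=
        pvS_count_congr _ _ _ (fun z _ => (hp2.count_eq z).symm)
    _ = pvS (PySem.List.sorted column1 (fun x => x) false) (PySem.List.sorted column2 (fun x => x) false) :=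
        ((hp1.map _).sum_eq).symm

-- ===== VERDICT (by name: the statement is the Claim_ definition above) =====
theorem find_similarity_score_spec : Claim_equal_find_similarity_score := by
  intro column1 column2 _
  unfold Spec_find_similarity_score find_similarity_score_alt
  rw [pv_A_eq_pvS, pvS_sorted,
    pvMerge_eq_pvS _ _
      (by simpa using PySem.List.sorted_pairwise column1 (fun x => x))
      (by simpa using PySem.List.sorted_pairwise column2 (fun x => x))]
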